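-- pv_equiv track=rewrite | github.com/buh07/RL-Decoder-using-SAE-Features | phase4/arithmetic_data_collector.py | find_token_for_char
-- ===== SOURCE A (Python) =====
-- from typing import Dict, List, Optional, Tuple
--
-- def find_token_for_char(
--     offset_mapping: List[Tuple[int, int]],
--     char_pos: int,
-- ) -> Optional[int]:
--     """Find the single token index that contains char_pos."""
--     for i, (s, e) in enumerate(offset_mapping):
--         if s <= char_pos < e:
--             return i
--     # Fall back: find the token that starts at or just before char_pos
--     best = None
--     for i, (s, e) in enumerate(offset_mapping):
--         if s <= char_pos:
--             best = i
--     return best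
-- ===== SOURCE B (Python) =====
-- def find_token_for_char(offset_mapping, char_pos):
--     """Single pass: record the first containing token and the last token starting at or before char_pos."""
--     first_containing = None
--     best = None
--     for i, (s, e) in enumerate(offset_mapping):
--         if first_containing is None and s <= char_pos < e:
--             first_containing = i
--         if s <= char_pos:
--             best = i
--     return first_containing if first_containing is not None else best
-- ===== Notes on version B (the rewrite author's own statement) =====
-- stated objective: simpler
-- what changed: Replaces A's two sequential scans (containment search, then last-start-before fallback) with one pass maintaining first_containing and best.
import Mathlib
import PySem

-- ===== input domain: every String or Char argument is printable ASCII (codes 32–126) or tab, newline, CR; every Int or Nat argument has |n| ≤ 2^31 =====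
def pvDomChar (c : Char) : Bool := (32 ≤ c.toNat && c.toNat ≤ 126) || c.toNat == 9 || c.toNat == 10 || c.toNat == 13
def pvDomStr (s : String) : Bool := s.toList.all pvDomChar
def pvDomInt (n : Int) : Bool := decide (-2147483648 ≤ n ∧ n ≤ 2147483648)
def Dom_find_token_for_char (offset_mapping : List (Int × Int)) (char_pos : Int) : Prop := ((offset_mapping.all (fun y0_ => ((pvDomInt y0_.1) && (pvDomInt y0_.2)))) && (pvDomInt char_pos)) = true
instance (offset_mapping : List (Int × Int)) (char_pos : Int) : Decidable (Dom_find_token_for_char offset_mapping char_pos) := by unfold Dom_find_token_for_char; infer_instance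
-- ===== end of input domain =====

-- B replaces A's two sequential scans with a single pass maintaining two locals (simpler decomposition, same cost).

-- ===== PORT A =====
-- first loop: return i on the first (s, e) with s <= char_pos < e
def ftcA_loop1 (om : List (Int × Int)) (c : Int) (i : Int) : Option Int :=
  match om with
  | [] => none
  | (s, e) :: rest => if s ≤ c ∧ c < e then some i else ftcA_loop1 rest c (i + 1)

-- second loop: best = last i with s <= char_pos
def ftcA_loop2 (om : List (Int × Int)) (c : Int) (i : Int) (best : Option Int) : Option Int :=
  match om with
  | [] => best
  | (s, _) :: rest => ftcA_loop2 rest c (i + 1) (if s ≤ c then some i else best)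

def find_token_for_char (offset_mapping : List (Int × Int)) (char_pos : Int) : Option Int :=
  match ftcA_loop1 offset_mapping char_pos 0 with
  | some i => some i
  | none => ftcA_loop2 offset_mapping char_pos 0 none

-- ===== PORT B =====
-- single pass carrying (first_containing, best)
def ftcB_loop (om : List (Int × Int)) (c : Int) (i : Int) (fc best : Option Int) :
    Option Int × Option Int :=
  match om with
  | [] => (fc, best)
  | (s, e) :: rest =>
      ftcB_loop rest c (i + 1)
        (if fc = none ∧ s ≤ c ∧ c < e then some i else fc)
        (if s ≤ c then some i else best)

def find_token_for_char_alt (offset_mapping : List (Int × Int)) (char_pos : Int) : Option Int :=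
  match ftcB_loop offset_mapping char_pos 0 none none with
  | (some i, _) => some i
  | (none, best) => best

-- ===== PRECONDITION & SPEC =====
def Spec_find_token_for_char (offset_mapping : List (Int × Int)) (char_pos : Int) (out : Option Int) : Prop := out = find_token_for_char_alt offset_mapping char_pos
instance (offset_mapping : List (Int × Int)) (char_pos : Int) (out : Option Int) : Decidable (Spec_find_token_for_char offset_mapping char_pos out) := by unfold Spec_find_token_for_char; infer_instance

-- ===== CLAIM (what is proved, stated in full; the proofs are below) =====
def Claim_equal_find_token_for_char : Prop := ∀ (offset_mapping : List (Int × Int)) (char_pos : Int), Dom_find_token_for_char offset_mapping char_pos → Spec_find_token_for_char offset_mapping char_pos (find_token_for_char offset_mapping char_pos)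

-- ===== LEMMAS AND PROOFS =====

-- the one-pass loop computes exactly (first-containing ∨ carried fc, A's fallback)
theorem ftcB_loop_eq (om : List (Int × Int)) (c : Int) :
    ∀ (i : Int) (fc best : Option Int),
      ftcB_loop om c i fc best
        = ((match fc with | some j => some j | none => ftcA_loop1 om c i), ftcA_loop2 om c i best) := by
  induction om with
  | nil =>
      intro i fc best
      cases fc <;> simp [ftcB_loop, ftcA_loop1, ftcA_loop2]
  | cons p rest ih =>
      intro i fc best
      obtain ⟨s, e⟩ := p
      cases fc with
      | some j =>
          simp [ftcB_loop, ftcA_loop2, ih]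
      | none =>
          by_cases h : s ≤ c ∧ c < e
          · simp [ftcB_loop, ftcA_loop1, ftcA_loop2, h, ih]
          · simp [ftcB_loop, ftcA_loop1, ftcA_loop2, h, ih]

-- ===== VERDICT (by name: the statement is the Claim_ definition above) =====
theorem find_token_for_char_spec : Claim_equal_find_token_for_char := by
  intro om c _
  unfold Spec_find_token_for_char find_token_for_char find_token_for_char_alt
  rw [ftcB_loop_eq]
  cases ftcA_loop1 om c 0 <;> rfl
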